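-- pv_equiv track=rewrite | github.com/PradeepBhosale2005/compli-ai-linter | backend/services/linter_service.py | check_missing_sections
-- ===== SOURCE A (Python) =====
-- from typing import Dict, List, Any, Optional
--
-- def check_missing_sections(doc_sections: Dict[str, str]) -> List[Dict[str, Any]]:
--     """
--     Core rule-based function to check for mandatory GxP sections.
--
--     Robustly checks for the presence of mandatory sections with case-insensitive
--     matching and whitespace handling.
--
--     Args:
--         doc_sections: Dictionary of section headers to content
--
--     Returns:
--         List of findings for missing mandatory sections
--     """
--     # Define mandatory sections for GxP compliance
--     mandatory_sections = [
--         "Purpose",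
--         "Scope",
--         "Responsibilities",
--         "Revision History",
--         "Approvals"
--     ]
--
--     findings = []
--
--     # Normalize section headers for comparison (lowercase, strip whitespace)
--     normalized_sections = {
--         key.lower().strip(): key for key in doc_sections.keys()
--     }
--
--     # Check for each mandatory section
--     for required_section in mandatory_sections:
--         # Check if the required section exists (case-insensitive)
--         section_found = False
--
--         for normalized_key in normalized_sections.keys():
--             # Check for exact match or if the required section is contained in the key
--             if (required_section.lower() in normalized_key or
--                 normalized_key in required_section.lower()):
--                 section_found = True
--                 break
--
--         if not section_found:
--             findings.append({
--                 "type": "missing_section",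
--                 "severity": "Critical",
--                 "section": required_section,
--                 "description": f"Missing mandatory section: '{required_section}'",
--                 "details": f"GxP documents must include a '{required_section}' section for compliance.",
--                 "location": "Document structure",
--                 "rule_type": "Core"
--             })
--
--     return findings
-- ===== SOURCE B (Python) =====
-- from typing import Dict, List, Any
--
-- MANDATORY_SECTIONS = [
--     "Purpose",
--     "Scope",
--     "Responsibilities",
--     "Revision History",
--     "Approvals",
-- ]
--
--
-- def _finding(section: str) -> Dict[str, Any]:
--     return {
--         "type": "missing_section",
--         "severity": "Critical",
--         "section": section,
--         "description": f"Missing mandatory section: '{section}'",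
--         "details": f"GxP documents must include a '{section}' section for compliance.",
--         "location": "Document structure",
--         "rule_type": "Core",
--     }
--
--
-- def _prune(labels: List[str], keys: List[str]) -> List[str]:
--     # Shrinking worklist: each key removes from the candidate list every label
--     # it matches (bidirectional containment on the normalized key); the loop
--     # stops early once no candidates remain.
--     for k in keys:
--         if not labels:
--             break
--         nk = k.lower().strip()
--         labels = [l for l in labels if not (l.lower() in nk or nk in l.lower())]
--     return labels
--
--
-- def check_missing_sections(doc_sections: Dict[str, str]) -> List[Dict[str, Any]]:
--     # The labels still in the worklist after all keys are the missing ones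
--     # (original order is preserved by the pruning filters).
--     return [_finding(s) for s in _prune(MANDATORY_SECTIONS, list(doc_sections))]
-- ===== Notes on version B (the rewrite author's own statement) =====
-- stated objective: alternative
-- what changed: B is a shrinking-worklist recursion: it recurses over the document keys, each key pruning from the remaining candidate-label list every mandatory label it matches, stopping early when the list is empty; the survivors are the missing sections, so there is no normalization dict, no found-flag scan and no matched set, and a label matched once is never tested again.
import Mathlib
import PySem

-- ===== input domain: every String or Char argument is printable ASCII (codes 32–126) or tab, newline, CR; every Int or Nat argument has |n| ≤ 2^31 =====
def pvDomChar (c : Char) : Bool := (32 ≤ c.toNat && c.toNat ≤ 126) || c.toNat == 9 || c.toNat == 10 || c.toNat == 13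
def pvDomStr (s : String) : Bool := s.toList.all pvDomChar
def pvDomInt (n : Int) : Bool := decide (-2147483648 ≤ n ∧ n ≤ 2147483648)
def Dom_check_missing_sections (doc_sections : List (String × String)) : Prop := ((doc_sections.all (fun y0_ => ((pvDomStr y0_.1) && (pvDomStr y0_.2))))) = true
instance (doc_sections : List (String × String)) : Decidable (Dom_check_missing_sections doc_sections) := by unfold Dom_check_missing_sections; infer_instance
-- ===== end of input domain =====

-- B replaces A's per-label scan of a normalization dict by a shrinking-worklist
-- recursion over the keys: each key prunes the labels it matches from the
-- candidate list, the survivors are the missing sections (objective: alternative).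

-- shared data helpers (same literal data in both Pythons)
def pvMandatory : List String :=
  ["Purpose", "Scope", "Responsibilities", "Revision History", "Approvals"]

def pvFinding (s : String) : List (String × String) :=
  [("type", "missing_section"),
   ("severity", "Critical"),
   ("section", s),
   ("description", "Missing mandatory section: '" ++ s ++ "'"),
   ("details", "GxP documents must include a '" ++ s ++ "' section for compliance."),
   ("location", "Document structure"),
   ("rule_type", "Core")]

-- the bidirectional containment test both Pythons use
def pvCond (required : String) (nk : String) : Bool :=
  PySem.Str.isIn (PySem.Str.lower required) nk || PySem.Str.isIn nk (PySem.Str.lower required)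

-- ===== PORT A =====
def check_missing_sections (doc_sections : List (String × String)) : List (List (String × String)) :=
  let normalized_sections : PySem.Dict String String :=
    doc_sections.foldl
      (fun d kv => d.insert (PySem.Str.strip (PySem.Str.lower kv.1)) kv.1) PySem.Dict.empty
  pvMandatory.foldl
    (fun findings required_section =>
      let section_found := normalized_sections.keys.any (fun nk => pvCond required_section nk)
      if !section_found then findings ++ [pvFinding required_section] else findings)
    []

-- ===== PORT B =====
-- B's _prune: recursion over the key list, filtering the label worklist
def pvPrune (labels : List String) (keys : List String) : List String :=
  if labels = [] then labels else
  match keys with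
  | [] => labels
  | k :: rest =>
      let nk := PySem.Str.strip (PySem.Str.lower k)
      pvPrune (labels.filter (fun l => !(pvCond l nk))) rest

def check_missing_sections_alt (doc_sections : List (String × String)) : List (List (String × String)) :=
  (pvPrune pvMandatory (doc_sections.map (fun kv => kv.1))).map pvFinding

-- ===== PRECONDITION & SPEC =====
def Spec_check_missing_sections (doc_sections : List (String × String)) (out : List (List (String × String))) : Prop := out = check_missing_sections_alt doc_sections
instance (doc_sections : List (String × String)) (out : List (List (String × String))) : Decidable (Spec_check_missing_sections doc_sections out) := by unfold Spec_check_missing_sections; infer_instance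

-- ===== CLAIM (what is proved, stated in full; the proofs are below) =====
def Claim_equal_check_missing_sections : Prop := ∀ (doc_sections : List (String × String)), Dom_check_missing_sections doc_sections → Spec_check_missing_sections doc_sections (check_missing_sections doc_sections)

-- ===== LEMMAS AND PROOFS =====

-- B's worklist recursion is the filter by "no key matches"
theorem pvPrune_eq (keys labels : List String) :
    pvPrune labels keys =
      labels.filter (fun l =>
        !(keys.any (fun k => pvCond l (PySem.Str.strip (PySem.Str.lower k))))) := by
  induction keys generalizing labels with
  | nil =>
    unfold pvPrune
    split_ifs with h
    · simp [h]
    · simp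
  | cons k rest ih =>
    unfold pvPrune
    split_ifs with h
    · simp [h]
    · simp only []
      rw [ih, List.filter_filter]
      apply List.filter_congr
      intro l _
      cases hc : pvCond l (PySem.Str.strip (PySem.Str.lower k)) <;> simp [hc]

-- A's per-label scan of the normalization dict finds a label iff some raw key matches it
theorem foundA_iff (doc : List (String × String)) (r : String) :
    ((doc.foldl
        (fun d kv => d.insert (PySem.Str.strip (PySem.Str.lower kv.1)) kv.1)
        (PySem.Dict.empty : PySem.Dict String String)).keys.any (fun nk => pvCond r nk)) = true ↔
      ∃ kv ∈ doc, pvCond r (PySem.Str.strip (PySem.Str.lower kv.1)) = true := by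
  rw [PySem.Dict.keys_foldl_insert_key]
  simp only [List.any_eq_true]
  constructor
  · rintro ⟨nk, hnk, hc⟩
    have : nk ∈ doc.map (fun kv => PySem.Str.strip (PySem.Str.lower kv.1)) := by
      have := (PySem.Set.mem_update (PySem.Dict.empty : PySem.Dict String String).keys _ nk).mp hnk
      simpa [PySem.Dict.keys_empty] using this
    obtain ⟨kv, hkv, rfl⟩ := List.mem_map.mp this
    exact ⟨kv, hkv, hc⟩
  · rintro ⟨kv, hkv, hc⟩
    refine ⟨PySem.Str.strip (PySem.Str.lower kv.1), ?_, hc⟩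
    rw [PySem.Set.mem_update]
    exact Or.inr (List.mem_map_of_mem hkv)

-- ===== VERDICT (by name: the statement is the Claim_ definition above) =====
theorem check_missing_sections_spec : Claim_equal_check_missing_sections := by
  intro doc _
  unfold Spec_check_missing_sections check_missing_sections check_missing_sections_alt
  rw [PySem.List.foldl_append_if
        (p := fun r =>
          !((doc.foldl
              (fun d kv => d.insert (PySem.Str.strip (PySem.Str.lower kv.1)) kv.1)
              (PySem.Dict.empty : PySem.Dict String String)).keys.any (fun nk => pvCond r nk)))
        (f := pvFinding)]
  simp only [List.nil_append]
  rw [pvPrune_eq]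
  congr 1
  apply List.filter_congr
  intro r _
  have h1 := foundA_iff doc r
  have h2 : ((doc.map (fun kv => kv.1)).any
      (fun k => pvCond r (PySem.Str.strip (PySem.Str.lower k)))) = true ↔
      ∃ kv ∈ doc, pvCond r (PySem.Str.strip (PySem.Str.lower kv.1)) = true := by
    simp [List.any_eq_true]
  rw [show (∀ (a b : Bool), (a = true ↔ b = true) → (!a) = (!b)) from
        fun a b h => by cases a <;> cases b <;> simp_all]
  exact h1.trans h2.symm
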